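-- pv_equiv track=rewrite | github.com/tiqi-group/icon | src/icon/client/api/experiments_controller.py | get_experiment_identifier_dict
-- ===== SOURCE A (Python) =====
-- from collections import Counter
--
-- def get_experiment_identifier_dict(experiments: list[str]) -> dict[str, str]:
--     """
--     Processes a list of experiment strings to create a dictionary of unique identifiers.
--
--     The keys are unique identifiers:
--     - If the instance name (within brackets) is unique, it is used as the key.
--     - If not, the instance name is appended with the class name to make it unique.
--
--     The values are the original full names from the input list.
--
--     Args:
--         experiments:
--             List of experiment strings in the format 'path.to.ClassName (InstanceName)'.
--
--     Returns:
--         A dictionary where keys are unique identifiers and values are the full names.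
--     """
--     # Extract instance names and track their counts
--     instance_names = [entry.split("(")[-1].strip(")") for entry in experiments]
--     instance_counts = Counter(instance_names)
--
--     # Create the result dictionary
--     identifier_dict = {}
--
--     for entry in experiments:
--         full_name, instance_name = entry.rsplit("(", 1)
--         instance_name = instance_name.strip(")")
--         class_name = full_name.split(".")[-1].strip()
--
--         # Determine unique identifier
--         if instance_counts[instance_name] == 1:
--             unique_identifier = instance_name
--         else:
--             unique_identifier = f"{instance_name} ({class_name})"
--
--         # Add to the dictionary
--         identifier_dict[unique_identifier] = entry
--
--     return identifier_dict
-- ===== SOURCE B (Python) =====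
-- def get_experiment_identifier_dict(experiments: list[str]) -> dict[str, str]:
--     # Each entry is parsed once via rindex/slicing; duplicated instance names are
--     # found by SORTING the name list and scanning adjacent equal pairs
--     # (sort-then-scan instead of hash counting with Counter), and the result
--     # dict is built in one shot from a zip of keys and entries.
--     cuts = [entry.rindex("(") for entry in experiments]
--     names = [entry[cut + 1:].strip(")") for entry, cut in zip(experiments, cuts)]
--     ordered = sorted(names)
--     duplicated = {a for a, b in zip(ordered, ordered[1:]) if a == b}
--
--     def key_for(entry, cut, inst):
--         if inst in duplicated:
--             class_name = entry[:cut].split(".")[-1].strip()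
--             return f"{inst} ({class_name})"
--         return inst
--
--     keys = (key_for(e, c, n) for e, c, n in zip(experiments, cuts, names))
--     return dict(zip(keys, experiments))
-- ===== Notes on version B (the rewrite author's own statement) =====
-- stated objective: alternative
-- what changed: Duplicated instance names are found by sorting the extracted name list and scanning adjacent equal pairs (sort-then-scan) instead of A's Counter hash counting, and the result dict is built in one shot with dict(zip(keys, experiments)) from a keys sequence computed over zip(experiments, names), instead of A's second loop that re-parses every entry and assigns into the dict.
import Mathlib
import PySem

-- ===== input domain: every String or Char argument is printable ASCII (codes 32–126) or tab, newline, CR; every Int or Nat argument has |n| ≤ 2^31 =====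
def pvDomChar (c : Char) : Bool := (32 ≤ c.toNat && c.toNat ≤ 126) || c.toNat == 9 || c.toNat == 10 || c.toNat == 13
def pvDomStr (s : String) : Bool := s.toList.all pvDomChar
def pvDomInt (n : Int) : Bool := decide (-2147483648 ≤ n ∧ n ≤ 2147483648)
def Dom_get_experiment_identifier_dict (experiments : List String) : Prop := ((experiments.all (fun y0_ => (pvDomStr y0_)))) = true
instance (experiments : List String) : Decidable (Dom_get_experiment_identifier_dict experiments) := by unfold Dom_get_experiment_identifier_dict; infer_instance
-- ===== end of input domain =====

-- B finds duplicated instance names by sorting the name list and scanning adjacent pairs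
-- (sort-then-scan instead of A's Counter hash counting), parses each entry once via
-- rindex/slicing, and builds the dict in one shot from a zip of keys and entries; equivalence
-- is proved on inputs where the Pythons do not raise (every entry contains "(").

-- ===== PORT A =====

-- entry.split("(")[-1]: the last piece of the split, i.e. everything after the LAST
-- occurrence of "(" (the whole string when "(" is absent and rfind is -1) — exact.
def pyInstanceName (entry : String) : String :=
  PySem.Str.stripChars
    (PySem.Str.slice entry (some (PySem.Str.rfind entry "(" + 1)) none) ")"

-- full_name.split(".")[-1].strip(): everything after the LAST "." (whole string if none) — exact.
def pyClassName (full_name : String) : String :=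
  PySem.Str.strip
    (PySem.Str.slice full_name (some (PySem.Str.rfind full_name "." + 1)) none)

-- entry.rsplit("(", 1) followed by the 2-tuple unpacking: none exactly where Python raises
-- ValueError ("(" absent, rfind = -1); else (before, after) the last "(" — exact.
def pyRsplitParen1 (entry : String) : Option (String × String) :=
  let r := PySem.Str.rfind entry "("
  if r == -1 then none
  else some (PySem.Str.slice entry none (some r), PySem.Str.slice entry (some (r + 1)) none)

-- loop body of A (the Option state is none once an entry made rsplit-unpacking raise)
def pyStepA (instance_counts : PySem.Dict String Int)
    (acc : Option (PySem.Dict String String)) (entry : String) :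
    Option (PySem.Dict String String) :=
  acc.bind (fun d =>
    match pyRsplitParen1 entry with
    | none => none
    | some (full_name, inst0) =>
      let instance_name := PySem.Str.stripChars inst0 ")"
      let class_name := pyClassName full_name
      let unique_identifier :=
        if instance_counts.getD instance_name 0 == 1 then instance_name
        else PySem.Str.join "" [instance_name, " (", class_name, ")"]
      some (d.insert unique_identifier entry))

def get_experiment_identifier_dict (experiments : List String) : List (String × String) :=
  let instance_names := experiments.map pyInstanceName
  let instance_counts := PySem.Dict.counter instance_names
  ((experiments.foldl (pyStepA instance_counts) (some PySem.Dict.empty)).getD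
    PySem.Dict.empty).items

-- ===== PORT B =====

-- entry.rindex("("): none exactly where Python raises ValueError ("(" absent, rfind = -1)
def bCut? (entry : String) : Option Int :=
  let r := PySem.Str.rfind entry "("
  if r == -1 then none else some r

-- entry[cut + 1:].strip(")")   (cut ≥ 0 here, a successful rindex)
def bInstFrom (entry : String) (cut : Int) : String :=
  PySem.Str.stripChars (PySem.Str.slice entry (some (cut + 1)) none) ")"

-- key_for(entry, cut, inst); entry[:cut].split(".")[-1] is everything after the LAST "."
-- of entry[:cut] (the whole prefix when "." is absent and rfind is -1) — exact.
def bKeyFor (duplicated : PySem.Set String) (entry : String) (cut : Int) (inst : String) :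
    String :=
  if PySem.Set.contains duplicated inst then
    let head := PySem.Str.slice entry none (some cut)
    let class_name :=
      PySem.Str.strip (PySem.Str.slice head (some (PySem.Str.rfind head "." + 1)) none)
    PySem.Str.join "" [inst, " (", class_name, ")"]
  else inst

def get_experiment_identifier_dict_alt (experiments : List String) : List (String × String) :=
  match experiments.mapM bCut? with
  | none => []   -- the cuts comprehension raised ValueError (an entry without "(")
  | some cuts =>
    let names := (experiments.zip cuts).map (fun p => bInstFrom p.1 p.2)
    let ordered := PySem.List.sorted names (fun x => x) false
    -- {a for a, b in zip(ordered, ordered[1:]) if a == b}  (ordered[1:] = drop 1: index ≥ 0)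
    let duplicated : PySem.Set String :=
      PySem.Set.ofList (((ordered.zip (ordered.drop 1)).filter (fun p => p.1 == p.2)).map (·.1))
    let keys := ((experiments.zip cuts).zip names).map
      (fun p => bKeyFor duplicated p.1.1 p.1.2 p.2)
    -- dict(zip(keys, experiments))
    ((keys.zip experiments).foldl (fun d p => d.insert p.1 p.2) PySem.Dict.empty).items

-- ===== PRECONDITION & SPEC =====
-- A raises ValueError (rsplit 2-unpacking) on any entry not containing "(" (rfind = -1);
-- exactly those inputs are excluded (B's rindex comprehension raises there too).
def Pre_get_experiment_identifier_dict (experiments : List String) : Prop :=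
  ∀ e ∈ experiments, PySem.Str.rfind e "(" ≠ -1
instance (experiments : List String) : Decidable (Pre_get_experiment_identifier_dict experiments) := by
  unfold Pre_get_experiment_identifier_dict; infer_instance

def pvWitness_get_experiment_identifier_dict : List String :=
  ["mod.Cls (i1)", "pkg.Other (i1)", "a.B (x)"]

def Spec_get_experiment_identifier_dict (experiments : List String) (out : List (String × String)) : Prop := out = get_experiment_identifier_dict_alt experiments
instance (experiments : List String) (out : List (String × String)) : Decidable (Spec_get_experiment_identifier_dict experiments out) := by unfold Spec_get_experiment_identifier_dict; infer_instance

-- ===== CLAIM (what is proved, stated in full; the proofs are below) =====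
def Claim_equal_get_experiment_identifier_dict : Prop := ∀ (experiments : List String), Dom_get_experiment_identifier_dict experiments → Pre_get_experiment_identifier_dict experiments → Spec_get_experiment_identifier_dict experiments (get_experiment_identifier_dict experiments)

-- ===== LEMMAS AND PROOFS =====

-- the key A assigns to an entry, as a function of the Counter
def keyA (cnt : PySem.Dict String Int) (e : String) : String :=
  if cnt.getD (pyInstanceName e) 0 == 1 then pyInstanceName e
  else PySem.Str.join ""
    [pyInstanceName e, " (",
     pyClassName (PySem.Str.slice e none (some (PySem.Str.rfind e "("))), ")"]

theorem stepA_some (cnt : PySem.Dict String Int) (d : PySem.Dict String String) (e : String)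
    (h : PySem.Str.rfind e "(" ≠ -1) :
    pyStepA cnt (some d) e = some (d.insert (keyA cnt e) e) := by
  simp only [pyStepA, pyRsplitParen1, Option.bind_some]
  rw [if_neg (show ¬((PySem.Str.rfind e "(" == -1) = true) by simpa using h)]
  rfl

theorem foldA_some (xs : List String) (cnt : PySem.Dict String Int)
    (d : PySem.Dict String String) (h : ∀ e ∈ xs, PySem.Str.rfind e "(" ≠ -1) :
    xs.foldl (pyStepA cnt) (some d)
      = some (xs.foldl (fun d e => d.insert (keyA cnt e) e) d) := by
  induction xs generalizing d with
  | nil => rfl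
  | cons x xs ih =>
    rw [List.foldl_cons, stepA_some cnt d x (h x List.mem_cons_self), List.foldl_cons]
    exact ih _ (fun e he => h e (List.mem_cons_of_mem _ he))

theorem mapM_cuts (xs : List String) (h : ∀ e ∈ xs, PySem.Str.rfind e "(" ≠ -1) :
    xs.mapM bCut? = some (xs.map (fun e => PySem.Str.rfind e "(")) := by
  induction xs with
  | nil => rfl
  | cons x xs ih =>
    have hx : bCut? x = some (PySem.Str.rfind x "(") := by
      simp only [bCut?]
      rw [if_neg (show ¬((PySem.Str.rfind x "(" == -1) = true) by
        simpa using h x List.mem_cons_self)]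
    rw [List.mapM_cons, hx, ih (fun e he => h e (List.mem_cons_of_mem _ he))]
    rfl

-- membership in the adjacent-equal scan of a ≤-sorted list is 'occurs at least twice'
theorem mem_adj_dups (l : List String) (x : String) :
    l.Pairwise (· ≤ ·) →
    ((x ∈ ((l.zip (l.drop 1)).filter (fun p => p.1 == p.2)).map (·.1)) ↔ 2 ≤ l.count x) := by
  induction l with
  | nil => intro _; simp
  | cons a t ih =>
    intro hp
    obtain ⟨ha, hp'⟩ := List.pairwise_cons.mp hp
    cases t with
    | nil =>
      have h : List.count x [a] ≤ 1 := by simpa using List.count_le_length (l := [a]) (a := x)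
      simp only [List.drop_succ_cons, List.drop_nil, List.zip_nil_right, List.filter_nil,
        List.map_nil, List.not_mem_nil, false_iff]
      omega
    | cons b t' =>
      have ihb := ih hp'
      have hzip : (a :: b :: t').zip ((a :: b :: t').drop 1)
          = (a, b) :: ((b :: t').zip ((b :: t').drop 1)) := by simp
      rw [hzip, List.filter_cons]
      by_cases hab : a = b
      · rw [if_pos (by simp [hab])]
        simp only [List.map_cons, List.mem_cons]
        by_cases hxa : x = a
        · subst hxa
          constructor
          · intro _; simp [hab]
            
          · intro _; exact Or.inl rfl
        · have hca : List.count x (a :: b :: t') = List.count x (b :: t') := by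
            rw [List.count_cons_of_ne (Ne.symm hxa)]
          rw [hca, ← ihb]
          constructor
          · rintro (h | h)
            · exact absurd h hxa
            · exact h
          · intro h; exact Or.inr h
      · rw [if_neg (by simp [hab])]
        by_cases hxa : x = a
        · subst hxa
          have hnot : x ∉ b :: t' := by
            intro hm
            rcases List.mem_cons.mp hm with rfl | hm'
            · exact hab rfl
            · exact hab (le_antisymm (ha b List.mem_cons_self)
                ((List.pairwise_cons.mp hp').1 x hm'))
          have hc0 : List.count x (b :: t') = 0 := List.count_eq_zero.mpr hnot
          have hc1 : List.count x (x :: b :: t') = 1 := by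
            rw [List.count_cons_self, hc0]
          rw [hc1, ihb, hc0]
          constructor
          · intro h; omega
          · intro h; omega
        · rw [List.count_cons_of_ne (Ne.symm hxa)]
          exact ihb

theorem zip_map_snd {α β : Type} (f : α → β) (xs : List α) :
    xs.zip (xs.map f) = xs.map (fun e => (e, f e)) := by
  induction xs with
  | nil => rfl
  | cons a t ih => simp [ih]

theorem map_zip_self {α β : Type} (k : α → β) (xs : List α) :
    (xs.map k).zip xs = xs.map (fun e => (k e, e)) := by
  induction xs with
  | nil => rfl
  | cons a t ih => simp [ih]

-- ===== VERDICT (by name: the statement is the Claim_ definition above) =====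
theorem get_experiment_identifier_dict_spec : Claim_equal_get_experiment_identifier_dict := by
  intro xs _ hpre
  unfold Spec_get_experiment_identifier_dict
  unfold get_experiment_identifier_dict get_experiment_identifier_dict_alt
  simp only
  rw [foldA_some xs _ PySem.Dict.empty hpre, Option.getD_some, mapM_cuts xs hpre]
  simp only
  rw [zip_map_snd (fun e => PySem.Str.rfind e "(") xs, List.map_map]
  have hnames : xs.map ((fun p => bInstFrom p.1 p.2) ∘ (fun e => (e, PySem.Str.rfind e "(")))
      = xs.map pyInstanceName := rfl
  rw [hnames, List.zip_map', List.map_map, map_zip_self _ xs, List.foldl_map]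
  set ordered := PySem.List.sorted (xs.map pyInstanceName) (fun x => x) false with hord
  set dup : PySem.Set String :=
    PySem.Set.ofList (((ordered.zip (ordered.drop 1)).filter (fun p => p.1 == p.2)).map (·.1))
    with hdup
  congr 1
  apply PySem.List.foldl_congr_mem
  intro acc e he
  have hmem : pyInstanceName e ∈ xs.map pyInstanceName := List.mem_map_of_mem he
  have hcnt1 : 0 < (xs.map pyInstanceName).count (pyInstanceName e) :=
    List.count_pos_iff.mpr hmem
  have hgd : (PySem.Dict.counter (xs.map pyInstanceName)).getD (pyInstanceName e) 0
      = ((xs.map pyInstanceName).count (pyInstanceName e) : Int) :=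
    PySem.Dict.getD_counter _ _
  have hperm : ordered.Perm (xs.map pyInstanceName) := PySem.List.sorted_perm _ _ _
  have hpw : ordered.Pairwise (· ≤ ·) := by
    have := PySem.List.sorted_pairwise (xs.map pyInstanceName) (fun x => x)
    simpa using this
  have hdmem : PySem.Set.contains dup (pyInstanceName e) = true
      ↔ 2 ≤ (xs.map pyInstanceName).count (pyInstanceName e) := by
    rw [PySem.Set.contains_iff, hdup, PySem.Set.mem_ofList,
      mem_adj_dups ordered (pyInstanceName e) hpw, hperm.count_eq]
  show acc.insert (keyA _ e) e
      = acc.insert (bKeyFor dup e (PySem.Str.rfind e "(") (pyInstanceName e)) e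
  unfold keyA bKeyFor
  by_cases h2 : 2 ≤ (xs.map pyInstanceName).count (pyInstanceName e)
  · have hd : PySem.Set.contains dup (pyInstanceName e) = true := hdmem.mpr h2
    have hA : ((((xs.map pyInstanceName).count (pyInstanceName e) : Int)) == 1) = false := by
      simp only [beq_eq_false_iff_ne]
      intro h; omega
    rw [hgd, hA, hd, if_neg (by simp), if_pos rfl]
    rfl
  · have hd : PySem.Set.contains dup (pyInstanceName e) = false := by
      rw [← Bool.not_eq_true, hdmem]; exact h2
    have hc1 : (xs.map pyInstanceName).count (pyInstanceName e) = 1 := by omega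
    have hA : ((((xs.map pyInstanceName).count (pyInstanceName e) : Int)) == 1) = true := by
      rw [hc1]; rfl
    rw [hgd, hA, hd, if_pos rfl, if_neg (by simp)]
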